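-- pv_equiv track=rewrite | github.com/samugdho/My.LeetCode.Solutions | 3_Longest_Substring_Without_Repeating_Characters.py | hasRepeats
-- ===== SOURCE A (Python) =====
-- def hasRepeats(s):
-- 	D = {}
-- 	for c in s:
-- 		if c not in D:
-- 			D[c] = 1
-- 		else:
-- 			return True
-- 	return False
-- ===== SOURCE B (Python) =====
-- def hasRepeats(s):
-- 	return len(set(s)) != len(s)
-- ===== Notes on version B (the rewrite author's own statement) =====
-- stated objective: idiomatic
-- what changed: The incremental seen-dict loop with early return is replaced by a single full-set construction and cardinality comparison (len(set(s)) != len(s)).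
import Mathlib
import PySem

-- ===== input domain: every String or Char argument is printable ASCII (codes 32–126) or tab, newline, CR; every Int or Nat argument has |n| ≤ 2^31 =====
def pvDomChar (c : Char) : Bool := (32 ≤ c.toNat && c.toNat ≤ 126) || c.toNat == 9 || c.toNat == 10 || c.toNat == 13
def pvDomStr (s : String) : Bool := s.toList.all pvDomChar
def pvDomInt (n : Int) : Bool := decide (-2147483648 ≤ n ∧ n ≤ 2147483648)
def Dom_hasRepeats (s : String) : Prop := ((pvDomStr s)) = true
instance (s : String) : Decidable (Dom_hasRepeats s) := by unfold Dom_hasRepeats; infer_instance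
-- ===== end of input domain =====

-- B replaces A's incremental seen-dict loop with early return by a single set
-- construction and cardinality comparison (idiomatic; same return value everywhere).

-- ===== PORT A =====
-- the for-loop over s with seen-dict D and early 'return True'
def hasRepeatsLoop (l : List Char) (D : PySem.Dict Char Int) : Bool :=
  match l with
  | [] => false
  | c :: rest =>
    if D.contains c = false then hasRepeatsLoop rest (D.insert c 1)
    else true

def hasRepeats (s : String) : Bool :=
  hasRepeatsLoop s.toList PySem.Dict.empty

-- ===== PORT B =====
def hasRepeats_alt (s : String) : Bool :=
  decide (PySem.Set.len (PySem.Set.ofList s.toList) ≠ PySem.Str.len s)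

-- ===== PRECONDITION & SPEC =====
def Spec_hasRepeats (s : String) (out : Bool) : Prop := out = hasRepeats_alt s
instance (s : String) (out : Bool) : Decidable (Spec_hasRepeats s out) := by unfold Spec_hasRepeats; infer_instance

-- ===== CLAIM (what is proved, stated in full; the proofs are below) =====
def Claim_equal_hasRepeats : Prop := ∀ (s : String), Dom_hasRepeats s → Spec_hasRepeats s (hasRepeats s)

-- ===== LEMMAS AND PROOFS =====

theorem hasRepeatsLoop_eq (l : List Char) (D : PySem.Dict Char Int) :
    hasRepeatsLoop l D = !decide (l.Nodup ∧ ∀ c ∈ l, D.contains c = false) := by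
  induction l generalizing D with
  | nil => simp [hasRepeatsLoop]
  | cons c rest ih =>
    by_cases hc : D.contains c = false
    · rw [show hasRepeatsLoop (c :: rest) D = hasRepeatsLoop rest (D.insert c 1) by
        simp [hasRepeatsLoop, hc], ih]
      congr 1
      rw [decide_eq_decide]
      simp only [List.nodup_cons, List.mem_cons, PySem.Dict.contains_insert,
        Bool.or_eq_false_iff, beq_eq_false_iff_ne]
      constructor
      · rintro ⟨hnd, hall⟩
        exact ⟨⟨fun hm => (hall c hm).1 rfl, hnd⟩,
          fun x hx => hx.elim (fun h => h ▸ hc) (fun h => (hall x h).2)⟩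
      · rintro ⟨⟨hcm, hnd⟩, hall⟩
        exact ⟨hnd, fun x hx => ⟨fun h => hcm (h ▸ hx), hall x (Or.inr hx)⟩⟩
    · simp only [Bool.not_eq_false] at hc
      rw [show hasRepeatsLoop (c :: rest) D = true by simp [hasRepeatsLoop, hc]]
      have hcontra : ¬ ((c :: rest).Nodup ∧ ∀ x ∈ c :: rest, D.contains x = false) := by
        rintro ⟨-, hall⟩
        have := hall c (List.mem_cons_self)
        rw [hc] at this; exact Bool.true_eq_false.mp this
      rw [decide_eq_false hcontra]; rfl

theorem length_ofList_eq_iff (l : List Char) :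
    (PySem.Set.ofList l).length = l.length ↔ l.Nodup := by
  induction l with
  | nil => simp [PySem.Set.ofList_nil]
  | cons c rest ih =>
    rw [PySem.Set.ofList_cons]
    by_cases hm : c ∈ rest
    · have hlt : ((PySem.Set.ofList rest).filter (fun y => !y == c)).length
          < (PySem.Set.ofList rest).length := by
        apply List.length_filter_lt_length_iff_exists.mpr
        exact ⟨c, (PySem.Set.mem_ofList _ _).mpr hm, by simp⟩
      have hle := PySem.Set.length_ofList_le rest
      constructor
      · intro h
        exfalso
        simp only [PySem.Set.discard, List.length_cons] at h
        omega
      · intro h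
        exact absurd hm (List.nodup_cons.mp h).1
    · have hfe : (PySem.Set.ofList rest).filter (fun y => !y == c) = PySem.Set.ofList rest := by
        apply List.filter_eq_self.mpr
        intro x hx
        have hxr : x ∈ rest := (PySem.Set.mem_ofList _ _).mp hx
        have hne : x ≠ c := fun h => hm (h ▸ hxr)
        simp [hne]
      simp only [PySem.Set.discard, hfe, List.length_cons, Nat.add_left_inj,
        List.nodup_cons]
      rw [ih]
      tauto

theorem hasRepeats_eq_alt (s : String) : hasRepeats s = hasRepeats_alt s := by
  unfold hasRepeats hasRepeats_alt
  rw [hasRepeatsLoop_eq]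
  have e1 : decide (s.toList.Nodup ∧
      ∀ c ∈ s.toList, (PySem.Dict.empty : PySem.Dict Char Int).contains c = false)
      = decide s.toList.Nodup := by
    rw [decide_eq_decide]
    exact ⟨fun h => h.1, fun h => ⟨h, fun c _ => PySem.Dict.contains_empty c⟩⟩
  have e2 : decide (PySem.Set.len (PySem.Set.ofList s.toList) ≠ PySem.Str.len s)
      = !decide s.toList.Nodup := by
    rw [← decide_not, decide_eq_decide, not_iff_not, ← length_ofList_eq_iff s.toList]
    simp [PySem.Set.len, PySem.Str.len]
  rw [e1, e2]

-- ===== VERDICT (by name: the statement is the Claim_ definition above) =====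
theorem hasRepeats_spec : Claim_equal_hasRepeats := by
  intro s _
  exact hasRepeats_eq_alt s
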